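-- pv_equiv track=rewrite | github.com/trip5/webstations | convert_playlists.py | url_to_name
-- ===== SOURCE A (Python) =====
-- def url_to_name(url: str, max_len: int = 128) -> str:
--     start = url
--     if start.startswith('http://'):
--         start = start[7:]
--     elif start.startswith('https://'):
--         start = start[8:]
--     name_chars = []
--     i = 0
--     j = 0
--     while i < len(start) and j < max_len - 1:
--         c = start[i]
--         if c == ':' and i+1 < len(start) and start[i+1].isdigit():
--             while i < len(start) and start[i] != '/':
--                 i += 1
--             if i >= len(start):
--                 break
--             c = start[i]
--         if c in ['/', '=', '&', '?']:
--             if j > 0 and name_chars[j-1] != '-':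
--                 name_chars.append('-')
--                 j += 1
--         else:
--             name_chars.append(c)
--             j += 1
--         i += 1
--     while name_chars and name_chars[-1] == '-':
--         name_chars.pop()
--     return ''.join(name_chars)
-- ===== SOURCE B (Python) =====
-- def url_to_name(url: str, max_len: int = 128) -> str:
--     if url.startswith('http://'):
--         url = url[7:]
--     elif url.startswith('https://'):
--         url = url[8:]
--     # drop ':<digit...>' port-like segments up to (not including) the next '/'
--     cleaned = []
--     i = 0
--     while i < len(url):
--         if url[i] == ':' and i + 1 < len(url) and url[i + 1].isdigit():
--             while i < len(url) and url[i] != '/':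
--                 i += 1
--         else:
--             cleaned.append(url[i])
--             i += 1
--     # split the cleaned text into separator-free words
--     parts = []
--     word = []
--     for c in cleaned:
--         if c in '/=&?':
--             if word:
--                 parts.append(''.join(word))
--                 word = []
--         else:
--             word.append(c)
--     if word:
--         parts.append(''.join(word))
--     # join words with '-', suppressing the dash after a word already ending in '-'
--     out = ''
--     for p in parts:
--         if out and not out.endswith('-'):
--             out += '-'
--         out += p
--     k = max_len - 1
--     if k <= 0:
--         return ''
--     return out[:k].rstrip('-')
-- ===== Notes on version B (the rewrite author's own statement) =====
-- stated objective: alternative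
-- what changed: A's single interleaved char-by-char state machine (port-skip, dash-insertion with lookback, inline length cap) is replaced by a multi-pass pipeline: clean out port segments, split into separator-free words, join the words with conditional dashes, then truncate to max_len-1 and rstrip trailing dashes.
import Mathlib
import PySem

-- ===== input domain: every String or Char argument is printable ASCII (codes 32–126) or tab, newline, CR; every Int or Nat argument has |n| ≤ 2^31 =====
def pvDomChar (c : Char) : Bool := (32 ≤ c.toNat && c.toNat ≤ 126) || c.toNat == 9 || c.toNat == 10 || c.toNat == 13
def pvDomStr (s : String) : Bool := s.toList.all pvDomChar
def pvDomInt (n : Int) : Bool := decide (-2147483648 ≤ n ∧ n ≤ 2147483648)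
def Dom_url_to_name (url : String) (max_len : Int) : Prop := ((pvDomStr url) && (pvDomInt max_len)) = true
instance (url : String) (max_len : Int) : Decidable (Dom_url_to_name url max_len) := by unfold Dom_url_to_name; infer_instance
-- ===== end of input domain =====

-- B replaces A's interleaved char-by-char dash-insertion state machine by a multi-pass
-- pipeline (clean ports, split into words, conditional join, truncate, rstrip); objective:
-- alternative decomposition, not speed.

-- ===== PORT A =====
-- inner loop of both Pythons: "while i < len(s) and s[i] != '/': i += 1"
def skipSlash (s : List Char) (i : Nat) : Nat :=
  if h : i < s.length ∧ s.getD i ' ' ≠ '/' then skipSlash s (i + 1) else i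
termination_by s.length - i
decreasing_by exact Nat.sub_succ_lt_self s.length i h.1

-- used by the ports' termination proofs
theorem le_skipSlash (s : List Char) (i : Nat) : i ≤ skipSlash s i := by
  rw [skipSlash]
  split
  · exact Nat.le_trans (Nat.le_succ i) (le_skipSlash s (i + 1))
  · exact Nat.le_refl i
termination_by s.length - i
decreasing_by exact Nat.sub_succ_lt_self s.length i (by rename_i h; exact h.1)

theorem lt_skipSlash (s : List Char) (i : Nat) (h1 : i < s.length) (h2 : s.getD i ' ' ≠ '/') :
    i < skipSlash s i := by
  rw [skipSlash, dif_pos ⟨h1, h2⟩]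
  exact Nat.lt_of_lt_of_le (Nat.lt_succ_self i) (le_skipSlash s (i + 1))

-- the ':' port-skip step: where A's i stands after the inner while (unchanged when no port follows)
def aNext (s : List Char) (i : Nat) : Nat :=
  if s.getD i ' ' = ':' ∧ i + 1 < s.length ∧ PySem.Chars.isdigit (s.getD (i + 1) ' ') then
    skipSlash s i else i

theorem le_aNext (s : List Char) (i : Nat) : i ≤ aNext s i := by
  unfold aNext; split
  · exact le_skipSlash s i
  · exact Nat.le_refl i

-- A's main while loop; j mirrors Python's j, acc mirrors name_chars (name_chars[j-1] = acc.getLast?)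
def aLoop (s : List Char) (maxLen : Int) (i : Nat) (j : Int) (acc : List Char) : List Char :=
  if h : i < s.length ∧ j < maxLen - 1 then
    let i' := aNext s i
    if _h2 : i' < s.length then
      let c := s.getD i' ' '
      if c = '/' ∨ c = '=' ∨ c = '&' ∨ c = '?' then
        if 0 < j ∧ acc.getLast? ≠ some '-' then
          aLoop s maxLen (i' + 1) (j + 1) (acc ++ ['-'])
        else
          aLoop s maxLen (i' + 1) j acc
      else
        aLoop s maxLen (i' + 1) (j + 1) (acc ++ [c])
    else acc  -- "break"
  else acc
termination_by s.length - i
decreasing_by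
  all_goals
    exact Nat.sub_lt_sub_left h.1 (Nat.lt_succ_of_le (le_aNext s i))

-- "while name_chars and name_chars[-1] == '-': name_chars.pop()" (acting on the reversed list)
def popRev : List Char → List Char
  | [] => []
  | c :: r => if c = '-' then popRev r else c :: r

def url_to_name (url : String) (max_len : Int) : String :=
  -- startswith / slices s[7:] (= drop 7), s[8:]
  let l := url.toList
  let start :=
    if PySem.Chars.startswith l ("http://".toList) then l.drop 7
    else if PySem.Chars.startswith l ("https://".toList) then l.drop 8
    else l
  String.ofList ((popRev (aLoop start max_len 0 0 []).reverse).reverse)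

-- ===== PORT B =====
-- B's cleaning pass: drop ':<digit…>' segments up to (not including) the next '/'
def bClean (s : List Char) (i : Nat) : List Char :=
  if h : i < s.length then
    if s.getD i ' ' = ':' ∧ i + 1 < s.length ∧ PySem.Chars.isdigit (s.getD (i + 1) ' ') then
      bClean s (skipSlash s i)
    else s.getD i ' ' :: bClean s (i + 1)
  else []
termination_by s.length - i
decreasing_by
  · exact Nat.sub_lt_sub_left h
      (lt_skipSlash s i h (by rename_i hp; rw [hp.1]; decide))
  · exact Nat.sub_succ_lt_self s.length i h

-- B's split pass: words between runs of '/=&?'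
def bSplit (cs : List Char) (word : List Char) (parts : List (List Char)) : List (List Char) :=
  match cs with
  | [] => if word ≠ [] then parts ++ [word] else parts
  | c :: r =>
    if c = '/' ∨ c = '=' ∨ c = '&' ∨ c = '?' then
      if word ≠ [] then bSplit r [] (parts ++ [word]) else bSplit r [] parts
    else bSplit r (word ++ [c]) parts

-- B's join pass: '-' between words, suppressed after a word already ending in '-'
def bJoin (parts : List (List Char)) (out : List Char) : List Char :=
  match parts with
  | [] => out
  | p :: r => bJoin r ((if out ≠ [] ∧ out.getLast? ≠ some '-' then out ++ ['-'] else out) ++ p)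

def url_to_name_alt (url : String) (max_len : Int) : String :=
  let l := url.toList
  let start :=
    if PySem.Chars.startswith l ("http://".toList) then l.drop 7
    else if PySem.Chars.startswith l ("https://".toList) then l.drop 8
    else l
  let cleaned := bClean start 0
  let parts := bSplit cleaned [] []
  let out := bJoin parts []
  let k := max_len - 1
  if k ≤ 0 then ""
  else
    -- out[:k] then .rstrip('-') (rstrip with the explicit strip-char '-': exact as reverse/dropWhile/reverse)
    String.ofList (((PySem.List.slice out none (some k)).reverse.dropWhile (fun c => c = '-')).reverse)

-- ===== PRECONDITION & SPEC =====
def Spec_url_to_name (url : String) (max_len : Int) (out : String) : Prop := out = url_to_name_alt url max_len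
instance (url : String) (max_len : Int) (out : String) : Decidable (Spec_url_to_name url max_len out) := by unfold Spec_url_to_name; infer_instance

-- ===== CLAIM (what is proved, stated in full; the proofs are below) =====
def Claim_equal_url_to_name : Prop := ∀ (url : String) (max_len : Int), Dom_url_to_name url max_len → Spec_url_to_name url max_len (url_to_name url max_len)

-- ===== LEMMAS AND PROOFS =====

-- emit flag: "output so far is nonempty and does not end in '-'"
def emitB (w : List Char) : Bool :=
  match w.getLast? with
  | some c => decide (c ≠ '-')
  | none => false

-- untruncated collapse state machine (A's loop without the j bound; state = emitB of the output)
def delta : List Char → Bool → List Char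
  | [], _ => []
  | c :: r, e =>
    if c = '/' ∨ c = '=' ∨ c = '&' ∨ c = '?' then
      if e then '-' :: delta r false else delta r e
    else c :: delta r (decide (c ≠ '-'))

-- accumulator-free form of bSplit
def splitW (cs : List Char) (w : List Char) : List (List Char) :=
  match cs with
  | [] => if w ≠ [] then [w] else []
  | c :: r =>
    if c = '/' ∨ c = '=' ∨ c = '&' ∨ c = '?' then
      if w ≠ [] then w :: splitW r [] else splitW r []
    else splitW r (w ++ [c])

-- accumulator-free form of bJoin
def joinD : List (List Char) → Bool → List Char
  | [], _ => []
  | p :: r, e => (if e then ['-'] else []) ++ p ++ joinD r (emitB p)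

def dashIf (e : Bool) : List Char := if e then ['-'] else []

-- "equal up to one extra trailing '-' on the left"
def Ap (x y : List Char) : Prop := x = y ∨ x = y ++ ['-']

theorem emitB_concat (w : List Char) (c : Char) : emitB (w ++ [c]) = decide (c ≠ '-') := by
  simp [emitB]

theorem emitB_true_iff (w : List Char) :
    emitB w = true ↔ (w ≠ [] ∧ w.getLast? ≠ some '-') := by
  unfold emitB
  match h : w.getLast? with
  | some c =>
    have : w ≠ [] := by rintro rfl; simp at h
    simp [this]
  | none =>
    have : w = [] := by simpa using h
    simp [this]

theorem skipSlash_spec (s : List Char) (i : Nat) (h : skipSlash s i < s.length) :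
    s.getD (skipSlash s i) ' ' = '/' := by
  by_cases hc : i < s.length ∧ s.getD i ' ' ≠ '/'
  · rw [skipSlash, dif_pos hc]
    rw [skipSlash, dif_pos hc] at h
    exact skipSlash_spec s (i + 1) h
  · rw [skipSlash, dif_neg hc]
    rw [skipSlash, dif_neg hc] at h
    rcases Decidable.not_and_iff_not_or_not.1 hc with h1 | h2
    · exact absurd h h1
    · exact not_not.1 h2
termination_by s.length - i
decreasing_by omega

theorem bClean_ge (s : List Char) (i : Nat) (h : ¬ i < s.length) : bClean s i = [] := by
  rw [bClean]; simp [h]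

-- one separator step of the truncated collapse, phrased to match A's branch
theorem step_sep (acc rest : List Char) (k : Int) (hj : (acc.length : Int) < k - 1)
    (c : Char) (hc : c = '/' ∨ c = '=' ∨ c = '&' ∨ c = '?') :
    acc ++ (delta (c :: rest) (emitB acc)).take ((k - 1 - (acc.length : Int)).toNat)
      = if 0 < (acc.length : Int) ∧ acc.getLast? ≠ some '-' then
          (acc ++ ['-']) ++ (delta rest (emitB (acc ++ ['-']))).take ((k - 1 - ((acc ++ ['-']).length : Int)).toNat)
        else
          acc ++ (delta rest (emitB acc)).take ((k - 1 - (acc.length : Int)).toNat) := by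
  by_cases he : 0 < (acc.length : Int) ∧ acc.getLast? ≠ some '-'
  · have hemit : emitB acc = true := by
      rw [emitB_true_iff]
      exact ⟨by rintro rfl; simp at he, he.2⟩
    have hemit' : emitB (acc ++ ['-']) = false := by simp [emitB_concat]
    have htk : (k - 1 - (acc.length : Int)).toNat
        = (k - 1 - ((acc ++ ['-']).length : Int)).toNat + 1 := by
      simp only [List.length_append, List.length_cons, List.length_nil]
      omega
    rw [if_pos he]
    simp only [delta, if_pos hc, hemit, if_true, hemit', htk, List.take_succ_cons]
    simp [List.append_assoc]
  · have hemit : emitB acc = false := by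
      rw [← Bool.not_eq_true, emitB_true_iff]
      intro hcontra
      apply he
      exact ⟨by cases acc with | nil => simp at hcontra | cons a l => simp, hcontra.2⟩
    rw [if_neg he]
    simp only [delta, if_pos hc, hemit, if_false, Bool.false_eq_true]

theorem take_succ_of_lt (acc : List Char) (k : Int) (hj : (acc.length : Int) < k - 1) (c : Char) (xs : List Char) :
    (c :: xs).take ((k - 1 - (acc.length : Int)).toNat)
      = c :: xs.take ((k - 1 - ((acc.length : Int) + 1)).toNat) := by
  have : (k - 1 - (acc.length : Int)).toNat = (k - 1 - ((acc.length : Int) + 1)).toNat + 1 := by omega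
  rw [this, List.take_succ_cons]

-- A's loop computes the truncated collapse of the cleaned suffix
theorem aLoop_delta (s : List Char) (k : Int) :
    ∀ (n i : Nat) (acc : List Char), s.length - i ≤ n →
    aLoop s k i (acc.length : Int) acc
      = acc ++ (delta (bClean s i) (emitB acc)).take ((k - 1 - (acc.length : Int)).toNat) := by
  intro n
  induction n with
  | zero =>
    intro i acc h
    have hi : ¬ i < s.length := by omega
    rw [aLoop, bClean]
    simp [hi, delta]
  | succ n ih =>
    intro i acc hn
    by_cases hi : i < s.length
    · by_cases hj : (acc.length : Int) < k - 1
      · rw [aLoop, dif_pos ⟨hi, hj⟩]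
        by_cases hp : s.getD i ' ' = ':' ∧ i + 1 < s.length ∧ PySem.Chars.isdigit (s.getD (i + 1) ' ')
        · -- port skip
          rw [show aNext s i = skipSlash s i from by unfold aNext; rw [if_pos hp]]
          have hcl : bClean s i = bClean s (skipSlash s i) := by
            rw [bClean, dif_pos hi, if_pos hp]
          set m := skipSlash s i with hm
          have him : i ≤ m := le_skipSlash s i
          by_cases hmlt : m < s.length
          · have hslash : s.getD m ' ' = '/' := skipSlash_spec s i hmlt
            have hcl2 : bClean s m = '/' :: bClean s (m + 1) := by
              rw [bClean, dif_pos hmlt]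
              have : ¬ (s.getD m ' ' = ':' ∧ m + 1 < s.length ∧ PySem.Chars.isdigit (s.getD (m + 1) ' ')) := by
                rw [hslash]; rintro ⟨h1, -⟩; simp at h1
              rw [if_neg this, hslash]
            rw [hcl, hcl2, dif_pos hmlt, hslash,
              if_pos (show ('/' : Char) = '/' ∨ ('/' : Char) = '=' ∨ ('/' : Char) = '&' ∨ ('/' : Char) = '?' from Or.inl rfl),
              step_sep acc (bClean s (m + 1)) k hj '/' (Or.inl rfl)]
            have hmeas : s.length - (m + 1) ≤ n := by omega
            split
            · have h1 : ((acc.length : Int) + 1) = (((acc ++ ['-']).length : Int)) := by simp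
              rw [h1, ih (m + 1) (acc ++ ['-']) hmeas]
            · rw [ih (m + 1) acc hmeas]
          · rw [hcl, bClean_ge s m hmlt]
            simp [dif_neg hmlt, delta]
        · -- no port skip
          rw [show aNext s i = i from by unfold aNext; rw [if_neg hp]]
          simp only [dif_pos hi]
          have hcl : bClean s i = s.getD i ' ' :: bClean s (i + 1) := by
            rw [bClean, dif_pos hi, if_neg hp]
          rw [hcl]
          have hmeas : s.length - (i + 1) ≤ n := by omega
          by_cases hc : s.getD i ' ' = '/' ∨ s.getD i ' ' = '=' ∨ s.getD i ' ' = '&' ∨ s.getD i ' ' = '?'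
          · rw [if_pos hc, step_sep acc (bClean s (i + 1)) k hj _ hc]
            split
            · have : ((acc.length : Int) + 1) = (((acc ++ ['-']).length : Int)) := by simp
              rw [this, ih (i + 1) (acc ++ ['-']) hmeas]
            · rw [ih (i + 1) acc hmeas]
          · rw [if_neg hc]
            have hd : delta (s.getD i ' ' :: bClean s (i + 1)) (emitB acc)
                = s.getD i ' ' :: delta (bClean s (i + 1)) (decide (s.getD i ' ' ≠ '-')) := by
              rw [delta, if_neg hc]
            rw [hd, take_succ_of_lt acc k hj]
            have h1 : ((acc.length : Int) + 1) = (((acc ++ [s.getD i ' ']).length : Int)) := by simp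
            have h2 : decide (s.getD i ' ' ≠ '-') = emitB (acc ++ [s.getD i ' ']) := (emitB_concat acc _).symm
            rw [h1, h2, ih (i + 1) (acc ++ [s.getD i ' ']) hmeas]
            simp [List.append_assoc]
      · rw [aLoop, dif_neg (by tauto)]
        have : (k - 1 - (acc.length : Int)).toNat = 0 := by omega
        simp [this]
    · rw [aLoop, bClean]
      simp [hi, delta]

theorem bSplit_eq (cs : List Char) :
    ∀ (w : List Char) (parts : List (List Char)), bSplit cs w parts = parts ++ splitW cs w := by
  induction cs with
  | nil => intro w parts; rw [bSplit, splitW]; split <;> simp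
  | cons c r ih =>
    intro w parts
    rw [bSplit, splitW]
    split
    · split
      · rw [ih [] (parts ++ [w])]; simp
      · rw [ih [] parts]
    · rw [ih (w ++ [c]) parts]

theorem splitW_ne_nil (cs : List Char) :
    ∀ (w : List Char), ∀ p ∈ splitW cs w, p ≠ [] := by
  induction cs with
  | nil =>
    intro w p hp
    rw [splitW] at hp
    split at hp
    · simp at hp; subst hp; assumption
    · simp at hp
  | cons c r ih =>
    intro w p hp
    rw [splitW] at hp
    split at hp
    · split at hp
      · rcases List.mem_cons.1 hp with rfl | hm
        · assumption
        · exact ih [] p hm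
      · exact ih [] p hp
    · exact ih (w ++ [c]) p hp

theorem bJoin_eq (parts : List (List Char)) :
    ∀ (out : List Char), (∀ p ∈ parts, p ≠ []) → bJoin parts out = out ++ joinD parts (emitB out) := by
  induction parts with
  | nil => intro out _; rw [bJoin, joinD]; simp
  | cons p r ih =>
    intro out hne
    rw [bJoin, joinD]
    have hp : p ≠ [] := hne p (by simp)
    have hcond : (if out ≠ [] ∧ out.getLast? ≠ some '-' then out ++ ['-'] else out)
        = out ++ (if emitB out then ['-'] else []) := by
      by_cases he : out ≠ [] ∧ out.getLast? ≠ some '-'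
      · rw [if_pos he, ((emitB_true_iff out).2 he : emitB out = true)]; simp
      · rw [if_neg he]
        have : emitB out = false := by
          rw [← Bool.not_eq_true, emitB_true_iff]; exact he
        rw [this]; simp
    rw [hcond]
    have hlast : emitB (out ++ (if emitB out then ['-'] else []) ++ p) = emitB p := by
      unfold emitB
      rw [List.getLast?_append_of_ne_nil _ hp]
    rw [ih _ (fun q hq => hne q (by simp [hq])), hlast]
    simp [List.append_assoc]

theorem Ap_append_left (a : List Char) {x y : List Char} (h : Ap x y) : Ap (a ++ x) (a ++ y) := by
  rcases h with rfl | rfl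
  · exact Or.inl rfl
  · exact Or.inr (by simp)

-- the collapse equals the split/join, up to one extra trailing '-'
theorem delta_joinD :
    ∀ (N : Nat) (cs : List Char), cs.length ≤ N →
      ((∀ (w : List Char) (e0 : Bool), w ≠ [] →
          Ap (dashIf e0 ++ w ++ delta cs (emitB w)) (joinD (splitW cs w) e0))
       ∧ (∀ e : Bool, Ap (if e then '-' :: delta cs false else delta cs e) (joinD (splitW cs []) e))) := by
  intro N
  induction N with
  | zero =>
    intro cs hlen
    have : cs = [] := List.length_eq_zero_iff.1 (Nat.le_zero.1 hlen)
    subst this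
    constructor
    · intro w e0 hw
      rw [splitW, if_pos hw]
      simp only [joinD]
      exact Or.inl (by simp [dashIf, delta])
    · intro e
      rw [splitW]
      cases e
      · exact Or.inl (by simp [delta, joinD])
      · exact Or.inr (by simp [delta, joinD])
  | succ N ih =>
    intro cs hlen
    cases cs with
    | nil =>
      constructor
      · intro w e0 hw
        rw [splitW, if_pos hw]
        simp only [joinD]
        exact Or.inl (by simp [dashIf, delta])
      · intro e
        rw [splitW]
        cases e
        · exact Or.inl (by simp [delta, joinD])
        · exact Or.inr (by simp [delta, joinD])
    | cons c r =>
      have hr : r.length ≤ N := by simp at hlen; omega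
      constructor
      · intro w e0 hw
        by_cases hc : c = '/' ∨ c = '=' ∨ c = '&' ∨ c = '?'
        · rw [splitW, if_pos hc, if_pos hw, joinD]
          have hstep : delta (c :: r) (emitB w) =
              if emitB w then '-' :: delta r false else delta r (emitB w) := by
            rw [delta, if_pos hc]; try simp
          rw [hstep]
          have := (ih r hr).2 (emitB w)
          rw [show (dashIf e0 ++ w ++ (if emitB w then '-' :: delta r false else delta r (emitB w)))
              = (if e0 then ['-'] else []) ++ (w ++ (if emitB w then '-' :: delta r false else delta r (emitB w))) by
            simp [dashIf, List.append_assoc]]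
          rw [List.append_assoc]
          exact Ap_append_left _ (Ap_append_left w this)
        · rw [splitW, if_neg hc]
          have hstep : delta (c :: r) (emitB w) = c :: delta r (emitB (w ++ [c])) := by
            rw [delta, if_neg hc, emitB_concat]
          rw [hstep]
          have := (ih r hr).1 (w ++ [c]) e0 (by simp)
          rw [show dashIf e0 ++ w ++ c :: delta r (emitB (w ++ [c]))
              = dashIf e0 ++ (w ++ [c]) ++ delta r (emitB (w ++ [c])) by simp]
          exact this
      · intro e
        by_cases hc : c = '/' ∨ c = '=' ∨ c = '&' ∨ c = '?'
        · rw [splitW, if_pos hc]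
          simp only [ne_eq, not_true_eq_false]
          cases e
          · have h1 : delta (c :: r) false = delta r false := by
              rw [delta, if_pos hc]; try simp
            rw [if_neg (by simp), h1]
            have := (ih r hr).2 false
            rw [if_neg (by simp)] at this
            exact this
          · have h1 : delta (c :: r) false = delta r false := by
              rw [delta, if_pos hc]; try simp
            rw [if_pos rfl, h1]
            have := (ih r hr).2 true
            rw [if_pos rfl] at this
            exact this
        · rw [splitW, if_neg hc]
          have hstep : delta (c :: r) false = c :: delta r (emitB [c]) := by
            rw [delta, if_neg hc]
            rfl
          cases e
          · rw [if_neg (by simp), hstep]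
            have := (ih r hr).1 [c] false (by simp)
            rw [show dashIf false ++ [c] ++ delta r (emitB [c]) = c :: delta r (emitB [c]) by simp [dashIf]] at this
            exact this
          · rw [if_pos rfl, hstep]
            have := (ih r hr).1 [c] true (by simp)
            rw [show dashIf true ++ [c] ++ delta r (emitB [c]) = '-' :: c :: delta r (emitB [c]) by simp [dashIf]] at this
            exact this

theorem popRev_eq_dropWhile (l : List Char) : popRev l = l.dropWhile (fun c => c = '-') := by
  induction l with
  | nil => rfl
  | cons c r ih =>
    rw [popRev, List.dropWhile_cons]
    by_cases hc : c = '-' <;> simp [hc, ih]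

theorem rstrip_take_dash (J : List Char) (t : Nat) :
    (((J ++ ['-']).take t).reverse.dropWhile (fun c => c = '-')).reverse
      = ((J.take t).reverse.dropWhile (fun c => c = '-')).reverse := by
  by_cases ht : t ≤ J.length
  · rw [List.take_append_of_le_length ht]
  · have h1 : (J ++ ['-']).take t = J ++ ['-'] := List.take_of_length_le (by simp; omega)
    have h2 : J.take t = J := List.take_of_length_le (by omega)
    rw [h1, h2]
    simp

-- ===== VERDICT (by name: the statement is the Claim_ definition above) =====
theorem url_to_name_spec : Claim_equal_url_to_name := by
  intro url max_len _
  unfold Spec_url_to_name url_to_name url_to_name_alt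
  simp only []
  generalize (if PySem.Chars.startswith url.toList ("http://".toList) then url.toList.drop 7
    else if PySem.Chars.startswith url.toList ("https://".toList) then url.toList.drop 8
    else url.toList) = st
  set cs := bClean st 0 with hcs
  -- A's loop = truncated collapse
  have hA : aLoop st max_len 0 0 [] = (delta cs false).take ((max_len - 1).toNat) := by
    have := aLoop_delta st max_len st.length 0 [] (by omega)
    simpa [emitB] using this
  -- B's passes = split/join
  have hB : bJoin (bSplit cs [] []) [] = joinD (splitW cs []) false := by
    rw [bSplit_eq cs [] [], List.nil_append,
        bJoin_eq (splitW cs []) [] (splitW_ne_nil cs [])]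
    simp [emitB]
  have hAp : Ap (delta cs false) (joinD (splitW cs []) false) := by
    have := (delta_joinD cs.length cs le_rfl).2 false
    rw [if_neg (by simp)] at this
    exact this
  by_cases hk : max_len - 1 ≤ 0
  · rw [if_pos hk, hA]
    have : (max_len - 1).toNat = 0 := by omega
    rw [this]
    simp [popRev]
  · rw [if_neg hk, hA, hB]
    rw [PySem.List.slice_to _ (by omega)]
    rw [popRev_eq_dropWhile]
    rcases hAp with heq | heq
    · rw [heq]
    · rw [heq, rstrip_take_dash]
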